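-- pv_equiv track=rewrite | github.com/Ahmed-Ali-313/Hackathon-I-Physical-AI-Humanoid-Robotics-Textbook | backend/src/services/chunking_service.py | get_chunk_summary
-- ===== SOURCE A (Python) =====
-- from typing import List, Dict, Any
--
-- def get_chunk_summary(chunks: List[Dict[str, Any]]) -> Dict[str, Any]:
--     """
--     Get summary statistics for chunks.
--
--     Args:
--         chunks: List of chunks
--
--     Returns:
--         Dictionary with summary statistics
--     """
--     total_words = sum(chunk['word_count'] for chunk in chunks)
--     avg_words = total_words // len(chunks) if chunks else 0
--
--     return {
--         'total_chunks': len(chunks),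
--         'total_words': total_words,
--         'avg_words_per_chunk': avg_words,
--         'min_words': min((chunk['word_count'] for chunk in chunks), default=0),
--         'max_words': max((chunk['word_count'] for chunk in chunks), default=0)
--     }
-- ===== SOURCE B (Python) =====
-- def get_chunk_summary(chunks):
--     total = 0
--     min_w = None
--     max_w = None
--     for chunk in chunks:
--         x = chunk['word_count']
--         total += x
--         if min_w is None or x < min_w:
--             min_w = x
--         if max_w is None or x > max_w:
--             max_w = x
--     n = len(chunks)
--     return {
--         'total_chunks': n,
--         'total_words': total,
--         'avg_words_per_chunk': total // n if n else 0,
--         'min_words': 0 if min_w is None else min_w,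
--         'max_words': 0 if max_w is None else max_w,
--     }
-- ===== Notes on version B (the rewrite author's own statement) =====
-- stated objective: alternative
-- what changed: B replaces A's three separate scans over chunks (sum, min, max generators) with one explicit single-pass loop maintaining total and optional running min/max.
import Mathlib
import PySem

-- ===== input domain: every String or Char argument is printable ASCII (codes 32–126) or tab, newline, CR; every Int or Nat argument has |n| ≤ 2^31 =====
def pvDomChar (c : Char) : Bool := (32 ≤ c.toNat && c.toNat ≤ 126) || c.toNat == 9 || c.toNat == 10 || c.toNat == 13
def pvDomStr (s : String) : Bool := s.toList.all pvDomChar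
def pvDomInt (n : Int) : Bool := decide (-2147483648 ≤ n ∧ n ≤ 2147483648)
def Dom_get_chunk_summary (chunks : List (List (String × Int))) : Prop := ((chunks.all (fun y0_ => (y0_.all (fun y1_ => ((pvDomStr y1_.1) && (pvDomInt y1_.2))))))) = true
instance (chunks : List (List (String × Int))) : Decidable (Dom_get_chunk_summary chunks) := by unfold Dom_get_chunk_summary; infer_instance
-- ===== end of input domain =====

-- B collapses A's three separate scans (sum, min generator, max generator) into one
-- explicit single-pass loop carrying total and optional running min/max (objective: alternative).
-- chunk['word_count'] (KeyError on a missing key): lookup is total here via getD 0; inputs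
-- with a missing key are excluded by Pre_ below.
def pvWC (c : List (String × Int)) : Int := (PySem.Dict.mk c).getD "word_count" 0

-- ===== PORT A =====
def get_chunk_summary (chunks : List (List (String × Int))) : List (String × Int) :=
  let total_words := chunks.foldl (fun a c => a + pvWC c) 0
  let avg_words := if chunks = [] then 0 else PySem.Int.floordiv total_words chunks.length
  [("total_chunks", (chunks.length : Int)),
   ("total_words", total_words),
   ("avg_words_per_chunk", avg_words),
   ("min_words", (PySem.List.min? (chunks.map pvWC) (fun x => x)).getD 0),
   ("max_words", (PySem.List.max? (chunks.map pvWC) (fun x => x)).getD 0)]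

-- ===== PORT B =====
-- the loop body of Source B: total += x; update optional running min/max
def pvStep (st : Int × Option Int × Option Int) (c : List (String × Int)) :
    Int × Option Int × Option Int :=
  let x := pvWC c
  (st.1 + x,
   (match st.2.1 with | none => some x | some m => if x < m then some x else some m),
   (match st.2.2 with | none => some x | some m => if x > m then some x else some m))

def get_chunk_summary_alt (chunks : List (List (String × Int))) : List (String × Int) :=
  let st := chunks.foldl pvStep (0, none, none)
  let n : Int := chunks.length
  [("total_chunks", n),
   ("total_words", st.1),
   ("avg_words_per_chunk", if n = 0 then 0 else PySem.Int.floordiv st.1 n),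
   ("min_words", st.2.1.getD 0),
   ("max_words", st.2.2.getD 0)]

-- ===== PRECONDITION & SPEC =====
-- Pre_: every chunk has the 'word_count' key (otherwise Python A raises KeyError).
def Pre_get_chunk_summary (chunks : List (List (String × Int))) : Prop :=
  ∀ c ∈ chunks, (PySem.Dict.mk c).contains "word_count" = true
instance (chunks : List (List (String × Int))) : Decidable (Pre_get_chunk_summary chunks) := by
  unfold Pre_get_chunk_summary; infer_instance
def pvWitness_get_chunk_summary : (List (List (String × Int))) := [[("word_count", 3)], [("word_count", 7)]]

def Spec_get_chunk_summary (chunks : List (List (String × Int))) (out : List (String × Int)) : Prop := out = get_chunk_summary_alt chunks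
instance (chunks : List (List (String × Int))) (out : List (String × Int)) : Decidable (Spec_get_chunk_summary chunks out) := by unfold Spec_get_chunk_summary; infer_instance

-- ===== CLAIM (what is proved, stated in full; the proofs are below) =====
def Claim_equal_get_chunk_summary : Prop := ∀ (chunks : List (List (String × Int))), Dom_get_chunk_summary chunks → Pre_get_chunk_summary chunks → Spec_get_chunk_summary chunks (get_chunk_summary chunks)

-- ===== LEMMAS AND PROOFS =====
theorem pvIfMin (x m : Int) : (if x < m then x else m) = min m x := by
  rcases lt_or_ge x m with h | h <;> simp [min_def] <;> omega

theorem pvIfMax (x m : Int) : (if x > m then x else m) = max m x := by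
  rcases lt_or_ge m x with h | h <;> simp [max_def] <;> omega

theorem pvStepFold (cs : List (List (String × Int))) (t m x : Int) :
    cs.foldl pvStep (t, some m, some x) =
      (cs.foldl (fun a c => a + pvWC c) t,
       some ((cs.map pvWC).foldl min m),
       some ((cs.map pvWC).foldl max x)) := by
  induction cs generalizing t m x with
  | nil => rfl
  | cons c cs ih =>
      simp only [List.foldl_cons, List.map_cons, pvStep]
      rw [show (if pvWC c < m then some (pvWC c) else some m) = some (min m (pvWC c)) by
            rw [← pvIfMin]; split <;> rfl,
          show (if pvWC c > x then some (pvWC c) else some x) = some (max x (pvWC c)) by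
            rw [← pvIfMax]; split <;> rfl]
      exact ih _ _ _

-- ===== VERDICT (by name: the statement is the Claim_ definition above) =====
theorem get_chunk_summary_spec : Claim_equal_get_chunk_summary := by
  intro chunks _ _
  unfold Spec_get_chunk_summary get_chunk_summary get_chunk_summary_alt
  cases chunks with
  | nil => rfl
  | cons c cs =>
      simp only [List.foldl_cons, List.map_cons, pvStep, pvStepFold,
        PySem.List.min?_id_cons, PySem.List.max?_id_cons, Option.getD_some,
        List.length_cons, zero_add]
      have h2 : ((cs.length : Int) + 1) ≠ 0 := by omega
      simp [h2]
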